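-- pv_equiv track=rewrite | github.com/MrBrantCode/unitest_baseline | mut_generate/mist_train_taco/taco_15990/solution.py | find_shortest_sequence_length
-- ===== SOURCE A (Python) =====
-- def binarize(num):
--     powers = []
--     power = 0
--     while num > 0:
--         bit = num % 2
--         num = num // 2
--         if bit:
--             powers.append(power)
--         power += 1
--     return list(reversed(powers))
--
-- def possible(binx, s, mpw):
--     for power in binx:
--         val = 2 ** power
--         times = min(s // val, mpw)
--         s = s - val * times
--     return s == 0
--
-- def optimize(binx, s, mn, mx):
--     mid = (mn + mx) // 2
--     if mid == mn:
--         return mx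
--     if possible(binx, s, mid):
--         return optimize(binx, s, mn, mid)
--     else:
--         return optimize(binx, s, mid, mx)
--
-- def find_shortest_sequence_length(x, s):
--     if s < x:
--         return -1
--     origs = s
--     repeats = 1
--     s = s - x
--     origs = s
--     binx = binarize(x)
--     mintimes = 0
--     for power in binx:
--         val = 2 ** power
--         times = s // val
--         s = s % val
--         mintimes = max(mintimes, times)
--     if s != 0:
--         return -1
--     return optimize(binx, origs, -1, mintimes) + repeats
-- ===== SOURCE B (Python) =====
-- def _reachable(x, s, m):
--     # greedy over set bits of x, highest first, capped at m repeats each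
--     while x > 0:
--         v = 2 ** (x.bit_length() - 1)
--         s -= v * min(s // v, m)
--         x -= v
--     return s == 0
--
--
-- def find_shortest_sequence_length(x, s):
--     if s < x:
--         return -1
--     rem = s - x
--     r, xx, mintimes = rem, x, 0
--     while xx > 0:
--         v = 2 ** (xx.bit_length() - 1)
--         mintimes = max(mintimes, r // v)
--         r %= v
--         xx -= v
--     if r != 0:
--         return -1
--     lo, hi = -1, mintimes
--     while (lo + hi) // 2 != lo:
--         mid = (lo + hi) // 2
--         if _reachable(x, rem, mid):
--             hi = mid
--         else:
--             lo = mid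
--     return hi + 1
-- ===== Notes on version B (the rewrite author's own statement) =====
-- stated objective: alternative
-- what changed: B drops the binarize bit-position list and the recursive optimize entirely: it peels the highest set bit of x directly (via bit_length) in two while-loops for the remainder/mintimes pass and the feasibility test, and finds the multiplier with an iterative lo/hi binary search.
import Mathlib
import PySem

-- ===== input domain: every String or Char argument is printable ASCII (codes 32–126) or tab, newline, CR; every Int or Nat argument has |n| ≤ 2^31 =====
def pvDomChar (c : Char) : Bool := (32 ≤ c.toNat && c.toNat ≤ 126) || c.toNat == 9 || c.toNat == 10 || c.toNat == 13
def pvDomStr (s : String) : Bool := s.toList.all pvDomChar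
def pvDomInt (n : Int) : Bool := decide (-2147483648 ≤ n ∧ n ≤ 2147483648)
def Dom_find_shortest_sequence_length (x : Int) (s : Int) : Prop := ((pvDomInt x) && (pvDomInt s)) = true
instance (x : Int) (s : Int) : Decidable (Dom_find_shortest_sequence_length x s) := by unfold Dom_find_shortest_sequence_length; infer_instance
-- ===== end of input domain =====

-- B replaces A's binarize-list + recursive binary search by direct bit-peeling loops
-- (highest set bit via bit_length) and an iterative lo/hi search: same values, different decomposition.

-- ===== PORT A =====
-- binarize: while-loop accumulating set-bit positions (ascending), then reversed
def binarizeLoop (num : Int) (power : Nat) (powers : List Nat) : List Nat :=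
  if h : 0 < num then
    binarizeLoop (PySem.Int.floordiv num 2) (power + 1)
      (if PySem.Int.mod num 2 ≠ 0 then powers ++ [power] else powers)
  else powers
termination_by num.toNat
decreasing_by
  rw [PySem.Int.floordiv_eq_ediv_of_pos (by norm_num : (0:Int) < 2)]; omega

def binarize (num : Int) : List Nat := (binarizeLoop num 0 []).reverse

def possibleA (binx : List Nat) (s : Int) (mpw : Int) : Bool :=
  (binx.foldl (fun s power =>
      let val : Int := 2 ^ power
      let times := min (PySem.Int.floordiv s val) mpw
      s - val * times) s) == 0

-- optimize: Python's recursion, with explicit fuel (enough fuel is supplied at the call site)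
def optimizeF (binx : List Nat) (s : Int) : Nat → Int → Int → Int
  | 0, _, mx => mx
  | Nat.succ n, mn, mx =>
    let mid := PySem.Int.floordiv (mn + mx) 2
    if mid = mn then mx
    else if possibleA binx s mid then optimizeF binx s n mn mid
    else optimizeF binx s n mid mx

def find_shortest_sequence_length (x : Int) (s : Int) : Int :=
  if s < x then -1
  else
    let s1 := s - x
    let binx := binarize x
    let p := binx.foldl (fun (st : Int × Int) power =>
        let val : Int := 2 ^ power
        let times := PySem.Int.floordiv st.1 val
        (PySem.Int.mod st.1 val, max st.2 times)) (s1, 0)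
    if p.1 ≠ 0 then -1
    else optimizeF binx s1 (p.2 + 1).toNat (-1) p.2 + 1

-- ===== PORT B =====
-- v = 2 ** (x.bit_length() - 1): the highest power of two ≤ x (for x > 0)
def pvHighBit (x : Int) : Int := (2:Int) ^ (PySem.Int.bitLength x - 1)

-- cited by the ports' decreasing_by
theorem pvHighBit_bounds (x : Int) (hx : 0 < x) : 1 ≤ pvHighBit x ∧ pvHighBit x ≤ x := by
  constructor
  · exact one_le_pow₀ (by norm_num)
  · have h := PySem.Int.two_pow_bitLength_le x (by omega)
    have : ((2 ^ (PySem.Int.bitLength x - 1) : Nat) : Int) ≤ ((x.natAbs : Nat) : Int) := by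
      exact_mod_cast h
    simpa [pvHighBit, Int.natAbs_of_nonneg (le_of_lt hx)] using this

-- _reachable: while x > 0, peel the highest set bit
def reachLoop (x : Int) (s : Int) (m : Int) : Int :=
  if h : 0 < x then
    let v := pvHighBit x
    reachLoop (x - v) (s - v * min (PySem.Int.floordiv s v) m) m
  else s
termination_by x.toNat
decreasing_by
  have hb := pvHighBit_bounds x h; omega

def reachable (x : Int) (s : Int) (m : Int) : Bool := reachLoop x s m == 0

-- the mintimes/remainder loop, peeling the highest set bit
def mtLoop (xx : Int) (r : Int) (mt : Int) : Int × Int :=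
  if h : 0 < xx then
    let v := pvHighBit xx
    mtLoop (xx - v) (PySem.Int.mod r v) (max mt (PySem.Int.floordiv r v))
  else (r, mt)
termination_by xx.toNat
decreasing_by
  have hb := pvHighBit_bounds xx h; omega

-- iterative binary search, with explicit fuel (enough fuel is supplied at the call site)
def bsearchLoop (x : Int) (rem : Int) : Nat → Int → Int → Int
  | 0, _, hi => hi
  | Nat.succ n, lo, hi =>
    let mid := PySem.Int.floordiv (lo + hi) 2
    if mid = lo then hi
    else if reachable x rem mid then bsearchLoop x rem n lo mid
    else bsearchLoop x rem n mid hi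

def find_shortest_sequence_length_alt (x : Int) (s : Int) : Int :=
  if s < x then -1
  else
    let rem := s - x
    let p := mtLoop x rem 0
    if p.1 ≠ 0 then -1
    else bsearchLoop x rem (p.2 + 1).toNat (-1) p.2 + 1

-- ===== PRECONDITION & SPEC =====
def Spec_find_shortest_sequence_length (x : Int) (s : Int) (out : Int) : Prop := out = find_shortest_sequence_length_alt x s
instance (x : Int) (s : Int) (out : Int) : Decidable (Spec_find_shortest_sequence_length x s out) := by unfold Spec_find_shortest_sequence_length; infer_instance

-- ===== CLAIM (what is proved, stated in full; the proofs are below) =====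
def Claim_equal_find_shortest_sequence_length : Prop := ∀ (x : Int) (s : Int), Dom_find_shortest_sequence_length x s → Spec_find_shortest_sequence_length x s (find_shortest_sequence_length x s)

-- ===== LEMMAS AND PROOFS =====

-- accumulator lemma for binarizeLoop
theorem binarizeLoop_acc (num : Int) (p : Nat) (acc : List Nat) :
    binarizeLoop num p acc = acc ++ binarizeLoop num p [] := by
  by_cases h : 0 < num
  · conv_lhs => rw [binarizeLoop]
    conv_rhs => rw [binarizeLoop]
    rw [dif_pos h, dif_pos h]
    rw [binarizeLoop_acc (PySem.Int.floordiv num 2) (p+1)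
        (if PySem.Int.mod num 2 ≠ 0 then acc ++ [p] else acc),
      binarizeLoop_acc (PySem.Int.floordiv num 2) (p+1)
        (if PySem.Int.mod num 2 ≠ 0 then ([] : List Nat) ++ [p] else [])]
    split <;> simp
  · conv_lhs => rw [binarizeLoop]
    conv_rhs => rw [binarizeLoop]
    rw [dif_neg h, dif_neg h]
    simp
termination_by num.toNat
decreasing_by
  all_goals rw [PySem.Int.floordiv_eq_ediv_of_pos (by norm_num : (0:Int) < 2)]; omega

theorem asc_unfold (num : Int) (p : Nat) (h : 0 < num) :
    binarizeLoop num p [] =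
      (if PySem.Int.mod num 2 ≠ 0 then [p] else []) ++ binarizeLoop (PySem.Int.floordiv num 2) (p+1) [] := by
  rw [binarizeLoop]
  rw [dif_pos h]
  rw [binarizeLoop_acc]
  split <;> simp

theorem asc_nil (num : Int) (p : Nat) (h : ¬ 0 < num) : binarizeLoop num p [] = [] := by
  rw [binarizeLoop, dif_neg h]

-- shift lemma: the running `power` offset is a map (+p)
theorem asc_shift (num : Int) (p : Nat) :
    binarizeLoop num p [] = (binarizeLoop num 0 []).map (· + p) := by
  by_cases h : 0 < num
  · rw [asc_unfold num p h, asc_unfold num 0 h,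
      asc_shift (PySem.Int.floordiv num 2) (p+1),
      asc_shift (PySem.Int.floordiv num 2) 1]
    simp only [List.map_append, List.map_map]
    congr 1
    · split <;> simp
    · congr 1; funext q; simp; omega
  · rw [asc_nil num p h, asc_nil num 0 h]; simp
termination_by num.toNat
decreasing_by
  all_goals rw [PySem.Int.floordiv_eq_ediv_of_pos (by norm_num : (0:Int) < 2)]; omega

-- the ascending list of bit VALUES of x
def pvMv (x : Int) : List Int := (binarizeLoop x 0 []).map (fun q => (2:Int) ^ q)

theorem pvMv_nil (x : Int) (h : ¬ 0 < x) : pvMv x = [] := by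
  rw [pvMv, asc_nil x 0 h]; rfl

theorem pvMv_unfold (x : Int) (h : 0 < x) :
    pvMv x = (if PySem.Int.mod x 2 ≠ 0 then [(1:Int)] else []) ++ (pvMv (PySem.Int.floordiv x 2)).map (fun v => 2 * v) := by
  rw [pvMv, asc_unfold x 0 h, asc_shift (PySem.Int.floordiv x 2) 1]
  simp only [List.map_append, List.map_map, pvMv]
  congr 1
  · split <;> simp
  · congr 1; funext q; simp [pow_succ, mul_comm]

theorem bitLength_pos (x : Int) (hx : 0 < x) : 1 ≤ PySem.Int.bitLength x := by
  by_contra h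
  have h0 : PySem.Int.bitLength x = 0 := by omega
  have := PySem.Int.lt_two_pow_bitLength x
  rw [h0] at this
  simp at this
  omega

theorem pvHighBit_double (x : Int) (hx : 2 ≤ x) :
    pvHighBit x = 2 * pvHighBit (PySem.Int.floordiv x 2) := by
  have hq : 0 < PySem.Int.floordiv x 2 := by
    rw [PySem.Int.floordiv_eq_ediv_of_pos (by norm_num : (0:Int) < 2)]; omega
  have hb := PySem.Int.bitLength_of_pos (show (0:Int) < x by omega)
  have hq1 := bitLength_pos _ hq
  rw [pvHighBit, pvHighBit, hb]
  have : PySem.Int.bitLength (PySem.Int.floordiv x 2) + 1 - 1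
       = (PySem.Int.bitLength (PySem.Int.floordiv x 2) - 1) + 1 := by omega
  rw [this, pow_succ, mul_comm]

-- main decomposition: the bit-value list of x is that of (x - highBit x) with highBit x appended
theorem pvMv_decomp (x : Int) (hx : 0 < x) :
    pvMv x = pvMv (x - pvHighBit x) ++ [pvHighBit x] := by
  by_cases h2 : 2 ≤ x
  · -- x ≥ 2
    have hq : 0 < PySem.Int.floordiv x 2 := by
      rw [PySem.Int.floordiv_eq_ediv_of_pos (by norm_num : (0:Int) < 2)]; omega
    have hqn : (PySem.Int.floordiv x 2).toNat < x.toNat := by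
      rw [PySem.Int.floordiv_eq_ediv_of_pos (by norm_num : (0:Int) < 2)] at hq ⊢; omega
    have ihq := pvMv_decomp (PySem.Int.floordiv x 2) hq
    have hd := pvHighBit_double x h2
    have hbq := pvHighBit_bounds (PySem.Int.floordiv x 2) hq
    have hqe : PySem.Int.floordiv x 2 = x / 2 :=
      PySem.Int.floordiv_eq_ediv_of_pos (by norm_num : (0:Int) < 2)
    set q := PySem.Int.floordiv x 2 with hqdef
    set h := pvHighBit q with hhdef
    have hhx : 2 * h ≤ x := by
      have := (pvHighBit_bounds x hx).2
      rw [hd] at this; exact this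
    rw [pvMv_unfold x hx, ihq, hd]
    by_cases hz : x - 2 * h = 0
    · -- x = 2h exactly: q = h and q - h = 0
      have hqh0 : q - h = 0 := by omega
      have hpar : PySem.Int.mod x 2 = 0 := by
        rw [PySem.Int.mod_eq_emod_of_pos (by norm_num : (0:Int) < 2)]
        omega
      rw [hqh0, hz, pvMv_nil 0 (by norm_num)]
      have hpar2 : ¬ (PySem.Int.mod x 2 ≠ 0) := not_not_intro hpar
      rw [if_neg hpar2]
      simp
    · -- x - 2h > 0
      have hx2 : 0 < x - 2 * h := by omega
      rw [pvMv_unfold (x - 2 * h) hx2]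
      have hpar : PySem.Int.mod (x - 2 * h) 2 = PySem.Int.mod x 2 := by
        rw [PySem.Int.mod_eq_emod_of_pos (by norm_num : (0:Int) < 2),
            PySem.Int.mod_eq_emod_of_pos (by norm_num : (0:Int) < 2)]
        omega
      have hdiv : PySem.Int.floordiv (x - 2 * h) 2 = q - h := by
        rw [PySem.Int.floordiv_eq_ediv_of_pos (by norm_num : (0:Int) < 2)]
        omega
      rw [hpar, hdiv]
      simp
  · -- x = 1
    have hx1 : x = 1 := by omega
    subst hx1
    have hb1 : pvHighBit 1 = 1 := by
      have hlt := PySem.Int.lt_two_pow_bitLength 1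
      have hle := PySem.Int.two_pow_bitLength_le 1 (by norm_num)
      have hbl : PySem.Int.bitLength 1 = 1 := by
        have h1 := bitLength_pos 1 (by norm_num)
        by_contra hc
        have h2 : 2 ≤ PySem.Int.bitLength 1 := by omega
        have hge : (2:Nat) ^ (PySem.Int.bitLength 1 - 1) ≥ 2 := by
          calc (2:Nat) ^ (PySem.Int.bitLength 1 - 1) ≥ 2 ^ 1 :=
                Nat.pow_le_pow_right (by norm_num) (by omega)
            _ = 2 := by norm_num
        simp [Int.natAbs] at hle
        omega
      rw [pvHighBit, hbl]
      norm_num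
    have hmv1 : pvMv 1 = [1] := by
      rw [pvMv_unfold 1 (by norm_num)]
      have hf : PySem.Int.floordiv 1 2 = 0 := by
        rw [PySem.Int.floordiv_eq_ediv_of_pos (by norm_num : (0:Int) < 2)]; decide
      have hm : PySem.Int.mod 1 2 = 1 := by
        rw [PySem.Int.mod_eq_emod_of_pos (by norm_num : (0:Int) < 2)]; decide
      rw [hf, pvMv_nil 0 (by norm_num)]
      simp
    rw [hb1, hmv1]
    norm_num
    rw [pvMv_nil 0 (by norm_num)]
termination_by x.toNat

-- descending bit-value list = binarize mapped through 2^·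
def pvVals (x : Int) : List Int := (binarize x).map (fun q => (2:Int) ^ q)

theorem pvVals_eq (x : Int) : pvVals x = (pvMv x).reverse := by
  rw [pvVals, pvMv, binarize, List.map_reverse]

theorem pvVals_nil (x : Int) (h : ¬ 0 < x) : pvVals x = [] := by
  rw [pvVals_eq, pvMv_nil x h]; rfl

theorem pvVals_cons (x : Int) (h : 0 < x) :
    pvVals x = pvHighBit x :: pvVals (x - pvHighBit x) := by
  rw [pvVals_eq, pvVals_eq, pvMv_decomp x h]
  simp

-- the two _reachable loops agree
theorem reachLoop_eq_foldl (x s m : Int) :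
    reachLoop x s m = List.foldl (fun s v => s - v * min (PySem.Int.floordiv s v) m) s (pvVals x) := by
  by_cases h : 0 < x
  · rw [reachLoop, dif_pos h, pvVals_cons x h, List.foldl_cons]
    exact reachLoop_eq_foldl (x - pvHighBit x) _ m
  · rw [reachLoop, dif_neg h, pvVals_nil x h, List.foldl_nil]
termination_by x.toNat
decreasing_by
  have hb := pvHighBit_bounds x h; omega

theorem possibleA_eq_reachable (x s m : Int) :
    possibleA (binarize x) s m = reachable x s m := by
  rw [possibleA, reachable, reachLoop_eq_foldl, pvVals]
  rw [List.foldl_map]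

-- the two mintimes loops agree
theorem mtLoop_eq_foldl (x r mt : Int) :
    mtLoop x r mt = List.foldl (fun (st : Int × Int) v =>
      (PySem.Int.mod st.1 v, max st.2 (PySem.Int.floordiv st.1 v))) (r, mt) (pvVals x) := by
  by_cases h : 0 < x
  · rw [mtLoop, dif_pos h, pvVals_cons x h, List.foldl_cons]
    exact mtLoop_eq_foldl (x - pvHighBit x) _ _
  · rw [mtLoop, dif_neg h, pvVals_nil x h, List.foldl_nil]
termination_by x.toNat
decreasing_by
  have hb := pvHighBit_bounds x h; omega

-- the two searches agree for every fuel
theorem optimizeF_eq_bsearchLoop (x s : Int) (n : Nat) (lo hi : Int) :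
    optimizeF (binarize x) s n lo hi = bsearchLoop x s n lo hi := by
  induction n generalizing lo hi with
  | zero => rfl
  | succ n ih =>
    rw [optimizeF, bsearchLoop]
    simp only [possibleA_eq_reachable]
    split
    · rfl
    · split
      · exact ih lo _
      · exact ih _ hi

-- ===== VERDICT (by name: the statement is the Claim_ definition above) =====
theorem find_shortest_sequence_length_spec : Claim_equal_find_shortest_sequence_length := by
  intro x s _
  unfold Spec_find_shortest_sequence_length
  unfold find_shortest_sequence_length find_shortest_sequence_length_alt
  by_cases hlt : s < x
  · simp [hlt]
  · simp only [if_neg hlt]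
    have hp : (binarize x).foldl (fun (st : Int × Int) power =>
        let val : Int := 2 ^ power
        let times := PySem.Int.floordiv st.1 val
        (PySem.Int.mod st.1 val, max st.2 times)) (s - x, 0) = mtLoop x (s - x) 0 := by
      rw [mtLoop_eq_foldl, pvVals, List.foldl_map]
    rw [hp]
    split
    · rfl
    · rw [optimizeF_eq_bsearchLoop]
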